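-- pv_equiv track=rewrite | github.com/MariaPonomarenko38/LegalLensNER | data.py | transform_to_tagged_string
-- ===== SOURCE A (Python) =====
-- def space(token):
--     if token not in [',', '.', '?']:
--         return " "
--     return ""
--
-- def transform_to_tagged_string(tokens, tags):
--     tagged_string = ""
--     current_tag = None
--
--     for token, tag in zip(tokens, tags):
--         if tag == "O":
--             if current_tag:
--                 tagged_string += f" </{current_tag}>"
--                 current_tag = None
--             tagged_string += space(token) + token
--         else:
--             entity = tag.split('-')[1]
--             if current_tag is None:
--                 tagged_string += f" <{entity}>" + space(token) + token
--                 current_tag = entity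
--             elif current_tag == entity:
--                 tagged_string += space(token) + token
--             else:
--                 tagged_string += f" </{current_tag}> <{entity}>" + space(token) + token
--                 current_tag = entity
--
--     if current_tag:
--         tagged_string += f" </{current_tag}>"
--
--     return tagged_string.strip()
-- ===== SOURCE B (Python) =====
-- def space(token):
--     if token not in [',', '.', '?']:
--         return " "
--     return ""
--
-- def transform_to_tagged_string(tokens, tags):
--     # Two-phase: compute each pair's entity key, then group consecutive equal
--     # keys and emit each group (open tag, body, close tag) independently.
--     items = [(tok, None if tag == "O" else tag.split('-')[1])
--              for tok, tag in zip(tokens, tags)]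
--     parts = []
--     i = 0
--     n = len(items)
--     while i < n:
--         key = items[i][1]
--         j = i
--         while j < n and items[j][1] == key:
--             j += 1
--         if key is not None:
--             parts.append(" <" + key + ">")
--         for tok, _ in items[i:j]:
--             parts.append(space(tok) + tok)
--         if key is not None:
--             parts.append(" </" + key + ">")
--         i = j
--     return "".join(parts).strip()
-- ===== Notes on version B (the rewrite author's own statement) =====
-- stated objective: alternative
-- what changed: Replaced A's single-pass current_tag state machine by a two-phase pass: first compute each pair's entity key (None for 'O', else tag.split('-')[1]), then group maximal runs of consecutive equal keys and emit each group's open tag, body and close tag independently, joining the parts at the end.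
-- intended difference: On inputs where a non-'O' tag with an empty entity part (e.g. 'B-') is followed by an 'O' tag or ends the zipped sequence, A's truthiness test `if current_tag:` treats the opened empty-entity group as unopened and silently drops its ' </>' closer (leaking the stale state across the following 'O' run), e.g. A(['x'],['B-']) = '<> x', while B returns '<> x </>', closing every group it opens — the intended BIO bracketing. — e.g. on transform_to_tagged_string(["x"], ["B-"]): A returns "<> x", B returns "<> x </>"
import Mathlib
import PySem

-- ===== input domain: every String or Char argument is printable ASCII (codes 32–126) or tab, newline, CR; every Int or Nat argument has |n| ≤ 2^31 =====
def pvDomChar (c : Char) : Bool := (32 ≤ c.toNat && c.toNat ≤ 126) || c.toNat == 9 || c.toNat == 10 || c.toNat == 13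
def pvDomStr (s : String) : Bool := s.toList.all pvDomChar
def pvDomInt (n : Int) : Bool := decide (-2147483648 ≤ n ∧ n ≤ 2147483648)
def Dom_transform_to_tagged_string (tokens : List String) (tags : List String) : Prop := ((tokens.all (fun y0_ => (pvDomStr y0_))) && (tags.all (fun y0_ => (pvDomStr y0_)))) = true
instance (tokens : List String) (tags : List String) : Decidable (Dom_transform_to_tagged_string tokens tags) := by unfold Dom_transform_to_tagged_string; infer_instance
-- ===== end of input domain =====

-- B replaces A's running current_tag state machine by a two-phase grouping pass (alternative
-- decomposition, same cost); return values are proved equal inside Pre_ and outside D_.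

-- ===== PORT A =====
-- space(token): " " unless token is one of ',' '.' '?'
def pvA_space (token : String) : String :=
  if ¬(token = "," ∨ token = "." ∨ token = "?") then " " else ""

-- one iteration of A's for-loop; state = (tagged_string, current_tag).
-- Python truthiness `if current_tag:` is false for None AND for the empty string, kept exactly.
-- tag.split('-') is PySem.Str.split? (always some, since "-" ≠ ""); [1] is pyGet?; its none case
-- (Python IndexError) is excluded by Pre_, the .getD "" there is never relied upon.
def pvA_step (st : String × Option String) (p : String × String) : String × Option String :=
  if p.2 = "O" then
    match st.2 with
    | some c => if c = "" then (st.1 ++ pvA_space p.1 ++ p.1, some c)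
                else (st.1 ++ " </" ++ c ++ ">" ++ pvA_space p.1 ++ p.1, none)
    | none => (st.1 ++ pvA_space p.1 ++ p.1, none)
  else
    let entity := (PySem.List.pyGet? ((PySem.Str.split? p.2 "-").getD []) 1).getD ""
    match st.2 with
    | none => (st.1 ++ " <" ++ entity ++ ">" ++ pvA_space p.1 ++ p.1, some entity)
    | some c => if c = entity then (st.1 ++ pvA_space p.1 ++ p.1, some c)
                else (st.1 ++ " </" ++ c ++ "> <" ++ entity ++ ">" ++ pvA_space p.1 ++ p.1, some entity)

def transform_to_tagged_string (tokens : List String) (tags : List String) : String :=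
  let fin := (tokens.zip tags).foldl pvA_step ("", none)
  PySem.Str.strip (match fin.2 with
    | some c => if c = "" then fin.1 else fin.1 ++ " </" ++ c ++ ">"
    | none => fin.1)

-- ===== PORT B =====
def pvB_space (token : String) : String :=
  if ¬(token = "," ∨ token = "." ∨ token = "?") then " " else ""

-- Source B's first phase: the per-pair entity key, None for "O", else tag.split('-')[1]
def pvB_key (tag : String) : Option String :=
  if tag = "O" then none
  else some ((PySem.List.pyGet? ((PySem.Str.split? tag "-").getD []) 1).getD "")

-- Source B's grouping loop: consume the maximal run of the head's key, emit the group, continue.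
-- The while-loop is bounded by the list length, ported as structural recursion on that bound.
def pvB_renderF : Nat → List (String × Option String) → List String
  | _, [] => []
  | 0, _ :: _ => []
  | fuel + 1, (t, k) :: rest =>
    let grp := rest.takeWhile (fun p => p.2 == k)
    let body := ((t, k) :: grp).map (fun p => pvB_space p.1 ++ p.1)
    (match k with
     | none => body
     | some e => (" <" ++ e ++ ">") :: (body ++ [" </" ++ e ++ ">"])) ++
      pvB_renderF fuel (rest.dropWhile (fun p => p.2 == k))

def pvB_render (l : List (String × Option String)) : List String := pvB_renderF l.length l

def transform_to_tagged_string_alt (tokens : List String) (tags : List String) : String :=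
  let items := (tokens.zip tags).map (fun p => (p.1, pvB_key p.2))
  PySem.Str.strip (PySem.Str.join "" (pvB_render items))

-- ===== PRECONDITION & SPEC =====
-- Pre_ excludes exactly the inputs where Python A raises IndexError: a zipped tag that is
-- neither "O" nor contains '-' (then tag.split('-')[1] is out of range).
def Pre_transform_to_tagged_string (tokens : List String) (tags : List String) : Prop :=
  ∀ p ∈ tokens.zip tags, p.2 = "O" ∨ 2 ≤ ((PySem.Str.split? p.2 "-").getD []).length

instance (tokens : List String) (tags : List String) : Decidable (Pre_transform_to_tagged_string tokens tags) := by
  unfold Pre_transform_to_tagged_string; infer_instance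

def pvWitness_transform_to_tagged_string : List String × List String :=
  (["John", "went", ","], ["B-PER", "O", "O"])

-- a tag with an empty entity part: not "O", and split('-')[1] = ""  (e.g. "B-", "a--b")
def pvBadTag (t : String) : Prop :=
  t ≠ "O" ∧ PySem.List.pyGet? ((PySem.Str.split? t "-").getD []) 1 = some ""

-- On inputs where a non-"O" tag with an empty entity part (e.g. "B-") is followed by an "O" tag or
-- ends the zipped sequence, A's truthiness test `if current_tag:` treats the opened empty-entity
-- group as "no open tag", silently dropping its " </>" closer (and leaking the stale state across
-- the following "O" run), while B closes every group it opens — the intended BIO bracketing.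
def D_transform_to_tagged_string (tokens : List String) (tags : List String) : Prop :=
  let ks := (tokens.zip tags).map Prod.snd
  (∃ pr ∈ ks.zip (ks.drop 1), pvBadTag pr.1 ∧ pr.2 = "O") ∨ (ks ≠ [] ∧ pvBadTag (ks.getLastD ""))

instance (tokens : List String) (tags : List String) : Decidable (D_transform_to_tagged_string tokens tags) := by
  unfold D_transform_to_tagged_string pvBadTag; infer_instance

def Spec_transform_to_tagged_string (tokens : List String) (tags : List String) (out : String) : Prop :=
  ¬ D_transform_to_tagged_string tokens tags → out = transform_to_tagged_string_alt tokens tags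

instance (tokens : List String) (tags : List String) (out : String) : Decidable (Spec_transform_to_tagged_string tokens tags out) := by
  unfold Spec_transform_to_tagged_string; infer_instance

def pvDiffWitness_transform_to_tagged_string : List String × List String := (["x"], ["B-"])

def pvDiffWitnessOut_transform_to_tagged_string : String × String := ("<> x", "<> x </>")

-- ===== CLAIM =====
def Claim_unchanged_transform_to_tagged_string : Prop :=
  ∀ (tokens : List String) (tags : List String), Dom_transform_to_tagged_string tokens tags →
    Pre_transform_to_tagged_string tokens tags →
    Spec_transform_to_tagged_string tokens tags (transform_to_tagged_string tokens tags)

def Claim_changed_transform_to_tagged_string : Prop :=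
  Dom_transform_to_tagged_string (pvDiffWitness_transform_to_tagged_string.1) (pvDiffWitness_transform_to_tagged_string.2) ∧
  Pre_transform_to_tagged_string (pvDiffWitness_transform_to_tagged_string.1) (pvDiffWitness_transform_to_tagged_string.2) ∧
  D_transform_to_tagged_string (pvDiffWitness_transform_to_tagged_string.1) (pvDiffWitness_transform_to_tagged_string.2) ∧
  transform_to_tagged_string (pvDiffWitness_transform_to_tagged_string.1) (pvDiffWitness_transform_to_tagged_string.2) = pvDiffWitnessOut_transform_to_tagged_string.1 ∧
  transform_to_tagged_string_alt (pvDiffWitness_transform_to_tagged_string.1) (pvDiffWitness_transform_to_tagged_string.2) = pvDiffWitnessOut_transform_to_tagged_string.2 ∧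
  pvDiffWitnessOut_transform_to_tagged_string.1 ≠ pvDiffWitnessOut_transform_to_tagged_string.2

-- ===== LEMMAS AND PROOFS =====

theorem pv_jn_nil : PySem.Str.join "" [] = "" := rfl

theorem pv_jn_cons (a : String) (l : List String) :
    PySem.Str.join "" (a :: l) = a ++ PySem.Str.join "" l := by
  simp only [PySem.Str.join, PySem.Chars.join, List.intercalate, List.map_cons]
  rw [← String.toList_inj]
  cases l <;> simp [String.toList_ofList]

theorem pv_jn_append (l1 l2 : List String) :
    PySem.Str.join "" (l1 ++ l2) = PySem.Str.join "" l1 ++ PySem.Str.join "" l2 := by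
  induction l1 with
  | nil => simp [pv_jn_nil, String.empty_append]
  | cons a t ih => simp [pv_jn_cons, ih, String.append_assoc]

theorem pv_gtlt : ("> <" : String) = ">" ++ " <" := by decide

-- A's loop, unrolled over the (token, key) view of the input; mirrors pvA_step exactly,
-- including the empty-string truthiness cases.
def pvContR : Option String → List (String × Option String) → String
  | none, [] => ""
  | some c, [] => if c = "" then "" else " </" ++ c ++ ">"
  | none, (t, none) :: rest => pvB_space t ++ t ++ pvContR none rest
  | some c, (t, none) :: rest =>
      if c = "" then pvB_space t ++ t ++ pvContR (some c) rest
      else " </" ++ c ++ ">" ++ pvB_space t ++ t ++ pvContR none rest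
  | none, (t, some e) :: rest => " <" ++ e ++ ">" ++ pvB_space t ++ t ++ pvContR (some e) rest
  | some c, (t, some e) :: rest =>
      if c = e then pvB_space t ++ t ++ pvContR (some e) rest
      else " </" ++ c ++ "> <" ++ e ++ ">" ++ pvB_space t ++ t ++ pvContR (some e) rest

def pvFinish (st : String × Option String) : String :=
  match st.2 with
  | some c => if c = "" then st.1 else st.1 ++ " </" ++ c ++ ">"
  | none => st.1

theorem pvA_space_eq (t : String) : pvA_space t = pvB_space t := rfl

-- A's fold equals the unrolled continuation (unconditionally)
theorem pvA_loop_eq (l : List (String × String)) : ∀ (acc : String) (cur : Option String),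
    pvFinish (l.foldl pvA_step (acc, cur)) = acc ++ pvContR cur (l.map fun p => (p.1, pvB_key p.2)) := by
  induction l with
  | nil =>
    intro acc cur
    cases cur with
    | none => simp [pvFinish, pvContR, String.append_empty]
    | some c =>
      by_cases hc : c = "" <;> simp [pvFinish, pvContR, hc, String.append_empty, String.append_assoc]
  | cons p l ih =>
    intro acc cur
    obtain ⟨t, tag⟩ := p
    rw [List.foldl_cons]
    by_cases htag : tag = "O"
    · cases cur with
      | none => simp [pvA_step, htag, pvB_key, pvContR, ih, pvA_space_eq, String.append_assoc]
      | some c =>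
        by_cases hc : c = "" <;>
          simp [pvA_step, htag, hc, pvB_key, pvContR, ih, pvA_space_eq, String.append_assoc]
    · cases cur with
      | none => simp [pvA_step, htag, pvB_key, pvContR, ih, pvA_space_eq, String.append_assoc]
      | some c =>
        by_cases hc : c = (PySem.List.pyGet? ((PySem.Str.split? tag "-").getD []) 1).getD "" <;>
          simp [pvA_step, htag, hc, pvB_key, pvContR, ih, pvA_space_eq, String.append_assoc]

-- validity of a key sequence: every empty-entity key is directly followed by a non-"O" key,
-- and does not end the sequence (= the negation of D_, expressed on the key list)
def pvOkKeys : List (Option String) → Prop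
  | [] => True
  | [k] => k ≠ some ""
  | k :: k' :: rest => (k = some "" → k'.isSome = true) ∧ pvOkKeys (k' :: rest)

theorem pvOkKeys_tail (k : Option String) (ks : List (Option String)) (h : pvOkKeys (k :: ks)) :
    pvOkKeys ks := by
  match ks with
  | [] => trivial
  | k' :: rest => exact h.2

theorem pvOkKeys_drop (l1 l2 : List (Option String)) (h : pvOkKeys (l1 ++ l2)) : pvOkKeys l2 := by
  induction l1 with
  | nil => exact h
  | cons k t ih => exact ih (pvOkKeys_tail k (t ++ l2) h)

theorem pvOkKeys_boundary (gk : List (Option String)) : ∀ (rest : List (Option String)),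
    pvOkKeys (gk ++ rest) → (∀ k ∈ gk, k = some "") → gk ≠ [] →
    ∃ k' ∈ rest.head?, k'.isSome = true := by
  induction gk with
  | nil => intro rest _ _ hne; exact absurd rfl hne
  | cons k t ih =>
    intro rest h hall _
    cases t with
    | nil =>
      cases rest with
      | nil => exact absurd (hall k (by simp)) (by simpa using h)
      | cons k' r => exact ⟨k', by simp, h.1 (hall k (by simp))⟩
    | cons k2 t2 =>
      exact ih rest (pvOkKeys_tail k _ h) (fun x hx => hall x (by simp [hx])) (by simp)

theorem pv_dropWhile_head {α : Type} (p : α → Bool) (l : List α) : ∀ (x : α) (xs : List α),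
    l.dropWhile p = x :: xs → p x = false := by
  induction l with
  | nil => intro x xs h; simp [List.dropWhile] at h
  | cons a t ih =>
    intro x xs h
    by_cases hp : p a
    · rw [List.dropWhile_cons_of_pos hp] at h; exact ih x xs h
    · rw [List.dropWhile_cons_of_neg hp] at h
      cases h
      simpa using hp

theorem pvContR_group_none (grp : List (String × Option String)) : ∀ (rest : List (String × Option String)),
    (∀ p ∈ grp, p.2 = none) →
    pvContR none (grp ++ rest) =
      PySem.Str.join "" (grp.map (fun p => pvB_space p.1 ++ p.1)) ++ pvContR none rest := by
  induction grp with
  | nil => intro rest _; simp [pv_jn_nil, String.empty_append]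
  | cons p t ih =>
    intro rest hall
    obtain ⟨tk, k⟩ := p
    have hk : k = none := hall (tk, k) (by simp)
    subst hk
    simp [pvContR, ih rest (fun x hx => hall x (by simp [hx])), pv_jn_cons, String.append_assoc]

theorem pvContR_group_some (grp : List (String × Option String)) : ∀ (rest : List (String × Option String)) (e : String),
    (∀ p ∈ grp, p.2 = some e) →
    pvContR (some e) (grp ++ rest) =
      PySem.Str.join "" (grp.map (fun p => pvB_space p.1 ++ p.1)) ++ pvContR (some e) rest := by
  induction grp with
  | nil => intro rest e _; simp [pv_jn_nil, String.empty_append]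
  | cons p t ih =>
    intro rest e hall
    obtain ⟨tk, k⟩ := p
    have hk : k = some e := hall (tk, k) (by simp)
    subst hk
    simp [pvContR, ih rest e (fun x hx => hall x (by simp [hx])), pv_jn_cons, String.append_assoc]

theorem pvContR_close (e : String) (rest : List (String × Option String))
    (h : (e ≠ "" ∧ ∀ p ∈ rest.head?, p.2 ≠ some e) ∨
         (∃ p ∈ rest.head?, ∃ e', p.2 = some e' ∧ e' ≠ e)) :
    pvContR (some e) rest = " </" ++ e ++ ">" ++ pvContR none rest := by
  cases rest with
  | nil =>
    rcases h with ⟨he, _⟩ | ⟨p, hp, _⟩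
    · simp [pvContR, he, String.append_empty]
    · simp at hp
  | cons q r =>
    obtain ⟨tk, k⟩ := q
    cases k with
    | none =>
      rcases h with ⟨he, _⟩ | ⟨q', hq, e', hq2, _⟩
      · simp [pvContR, he, String.append_assoc]
      · simp at hq; rw [← hq] at hq2; simp at hq2
    | some e' =>
      have hne : ¬ e = e' := by
        rcases h with ⟨_, hall⟩ | ⟨q', hq, e'', hq2, hne⟩
        · intro heq; exact hall (tk, some e') (by simp) (by simp [heq])
        · simp at hq; rw [← hq] at hq2; simp at hq2; subst hq2
          exact fun heq => hne heq.symm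
      simp [pvContR, hne, String.append_assoc]
      rw [pv_gtlt, String.append_assoc]

-- the unrolled loop equals Source B's grouped rendering, on valid key sequences
theorem pvContR_eq_render_aux (n : Nat) : ∀ (items : List (String × Option String)),
    items.length ≤ n → pvOkKeys (items.map Prod.snd) →
    pvContR none items = PySem.Str.join "" (pvB_renderF n items) := by
  induction n with
  | zero =>
    intro items hlen _
    have : items = [] := List.eq_nil_of_length_eq_zero (Nat.le_zero.mp hlen)
    subst this
    simp [pvContR, pvB_renderF, pv_jn_nil]
  | succ n ih =>
    intro items hlen hok
    match items with
    | [] => simp [pvContR, pvB_renderF, pv_jn_nil]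
    | (t, k) :: rest =>
      have hsplit : rest.takeWhile (fun p => p.2 == k) ++ rest.dropWhile (fun p => p.2 == k) = rest :=
        List.takeWhile_append_dropWhile
      have hgrp : ∀ p ∈ rest.takeWhile (fun p => p.2 == k), p.2 = k := by
        intro p hp
        have := List.mem_takeWhile_imp hp
        simpa using this
      have hlen' : (rest.dropWhile (fun p => p.2 == k)).length ≤ n :=
        le_trans (List.length_dropWhile_le _ _) (Nat.le_of_succ_le_succ (by simpa using hlen))
      have hkeys : ((t, k) :: rest).map Prod.snd =
          (((t, k) :: rest.takeWhile (fun p => p.2 == k)).map Prod.snd) ++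
          ((rest.dropWhile (fun p => p.2 == k)).map Prod.snd) := by
        rw [← List.map_append]
        simp [hsplit]
      have hokrest : pvOkKeys ((rest.dropWhile (fun p => p.2 == k)).map Prod.snd) :=
        pvOkKeys_drop _ _ (hkeys ▸ hok)
      have ihr := ih (rest.dropWhile (fun p => p.2 == k)) hlen' hokrest
      rw [show pvB_renderF (n+1) ((t, k) :: rest) =
            (match k with
             | none => ((t, k) :: rest.takeWhile (fun p => p.2 == k)).map (fun p => pvB_space p.1 ++ p.1)
             | some e => (" <" ++ e ++ ">") :: ((((t, k) :: rest.takeWhile (fun p => p.2 == k)).map (fun p => pvB_space p.1 ++ p.1)) ++ [" </" ++ e ++ ">"])) ++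
              pvB_renderF n (rest.dropWhile (fun p => p.2 == k)) from rfl]
      cases k with
      | none =>
        have hrw := pvContR_group_none (rest.takeWhile (fun p => p.2 == (none : Option String)))
          (rest.dropWhile (fun p => p.2 == (none : Option String))) hgrp
        rw [hsplit] at hrw
        rw [show pvContR none ((t, none) :: rest) = pvB_space t ++ t ++ pvContR none rest from rfl,
            hrw, ihr]
        simp [pv_jn_append, pv_jn_cons, String.append_assoc]
      | some e =>
        have hclose : pvContR (some e) (rest.dropWhile (fun p => p.2 == some e)) =
            " </" ++ e ++ ">" ++ pvContR none (rest.dropWhile (fun p => p.2 == some e)) := by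
          apply pvContR_close
          by_cases he : e = ""
          · subst he
            have hbd := pvOkKeys_boundary (((t, some "") :: rest.takeWhile (fun p => p.2 == some "")).map Prod.snd)
              ((rest.dropWhile (fun p => p.2 == some "")).map Prod.snd)
              (hkeys ▸ hok)
              (by
                intro x hx
                simp only [List.map_cons, List.mem_cons] at hx
                rcases hx with rfl | hx
                · rfl
                · simp only [List.mem_map] at hx
                  obtain ⟨p, hp, rfl⟩ := hx
                  exact hgrp p hp)
              (by simp)
            cases hrd : rest.dropWhile (fun p => p.2 == some "") with
            | nil => rw [hrd] at hbd; simp at hbd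
            | cons q r' =>
              rw [hrd] at hbd
              obtain ⟨k', hk', hsome⟩ := hbd
              simp at hk'
              right
              refine ⟨q, by simp, ?_⟩
              have hqfail := pv_dropWhile_head (fun p => p.2 == some "") rest q r' hrd
              simp at hqfail
              rw [← hk'] at hsome
              cases hq2 : q.2 with
              | none => rw [hq2] at hsome; simp at hsome
              | some e' =>
                refine ⟨e', rfl, ?_⟩
                intro heq
                rw [heq] at hq2
                exact hqfail hq2
          · left
            refine ⟨he, ?_⟩
            intro p hp
            cases hrd : rest.dropWhile (fun p => p.2 == some e) with
            | nil => rw [hrd] at hp; simp at hp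
            | cons q r' =>
              rw [hrd] at hp
              simp at hp
              subst hp
              have hqfail := pv_dropWhile_head (fun p => p.2 == some e) rest q r' hrd
              simpa using hqfail
        have hrw := pvContR_group_some (rest.takeWhile (fun p => p.2 == some e))
          (rest.dropWhile (fun p => p.2 == some e)) e hgrp
        rw [hsplit] at hrw
        rw [show pvContR none ((t, some e) :: rest) =
              " <" ++ e ++ ">" ++ pvB_space t ++ t ++ pvContR (some e) rest from rfl,
            hrw, hclose, ihr]
        simp [pv_jn_append, pv_jn_cons, String.append_assoc]

-- translating Pre_ ∧ ¬D_ to validity of the key sequence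
theorem pv_toOk (ks : List String)
    (hpre : ∀ t ∈ ks, t = "O" ∨ 2 ≤ ((PySem.Str.split? t "-").getD []).length)
    (hpair : ∀ pr ∈ ks.zip (ks.drop 1), ¬(pvBadTag pr.1 ∧ pr.2 = "O"))
    (hlast : ks = [] ∨ ¬ pvBadTag (ks.getLastD "")) :
    pvOkKeys (ks.map pvB_key) := by
  induction ks with
  | nil => trivial
  | cons t rest ih =>
    have hbad : pvB_key t = some "" → pvBadTag t := by
      intro hk
      simp only [pvB_key] at hk
      by_cases ht : t = "O"
      · simp [ht] at hk
      · simp only [ht, if_false, Option.some.injEq] at hk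
        rcases hpre t (by simp) with h | h
        · exact absurd h ht
        · refine ⟨ht, ?_⟩
          match hl : (PySem.Str.split? t "-").getD [] with
          | [] => rw [hl] at h; simp at h
          | [a] => rw [hl] at h; simp at h
          | a :: b :: tl =>
            rw [hl] at hk
            have : PySem.List.pyGet? (a :: b :: tl) 1 = some b := by
              simp [PySem.List.pyGet?, PySem.List.pyIdx?]
            rw [this] at hk
            have hb : b = "" := by simpa using hk
            rw [this, hb]
    cases rest with
    | nil =>
      show pvB_key t ≠ some ""
      intro hk
      rcases hlast with h | h
      · simp at h
      · exact h (by simpa using hbad hk)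
    | cons t' r =>
      refine ⟨?_, ?_⟩
      · intro hk
        simp only [pvB_key]
        by_cases ht' : t' = "O"
        · exact absurd ⟨hbad hk, ht'⟩ (hpair (t, t') (by simp))
        · simp [ht']
      · exact ih (fun x hx => hpre x (by simp [hx]))
          (fun pr hpr => hpair pr (by simpa using List.mem_cons_of_mem _ hpr))
          (Or.inr (by
            rcases hlast with h | h
            · simp at h
            · rw [List.getLastD_cons] at h
              rw [List.getLastD_eq_getLast?] at h ⊢
              cases hg : (t' :: r).getLast? with
              | none => simp at hg
              | some x => rw [hg] at h; simpa using h))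

-- ===== VERDICT (by name: the statement is the Claim_ definition above) =====
theorem transform_to_tagged_string_spec : Claim_unchanged_transform_to_tagged_string := by
  intro tokens tags _ hpre hnd
  show transform_to_tagged_string tokens tags = transform_to_tagged_string_alt tokens tags
  have hA : transform_to_tagged_string tokens tags =
      PySem.Str.strip (pvFinish ((tokens.zip tags).foldl pvA_step ("", none))) := rfl
  rw [hA, pvA_loop_eq, String.empty_append]
  have hok : pvOkKeys (((tokens.zip tags).map (fun p => (p.1, pvB_key p.2))).map Prod.snd) := by
    have hmap : ((tokens.zip tags).map (fun p => (p.1, pvB_key p.2))).map Prod.snd =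
        ((tokens.zip tags).map Prod.snd).map pvB_key := by
      simp [List.map_map]
    rw [hmap]
    apply pv_toOk
    · intro t ht
      simp only [List.mem_map] at ht
      obtain ⟨p, hp, rfl⟩ := ht
      exact hpre p hp
    · intro pr hpr hcontra
      exact hnd (Or.inl ⟨pr, hpr, hcontra⟩)
    · by_cases hk : (tokens.zip tags).map Prod.snd = []
      · exact Or.inl hk
      · refine Or.inr ?_
        intro hb
        exact hnd (Or.inr ⟨hk, hb⟩)
  rw [pvContR_eq_render_aux ((tokens.zip tags).map (fun p => (p.1, pvB_key p.2))).length _ le_rfl hok]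
  rfl

theorem transform_to_tagged_string_changed : Claim_changed_transform_to_tagged_string := by
  unfold Claim_changed_transform_to_tagged_string; decide
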